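-- pv_equiv track=rewrite | github.com/mobilityiq/tracking-machine-learning | training/training-3.0.py | segment_data_by_time
-- ===== SOURCE A (Python) =====
-- def segment_data_by_time(timestamps, data, segment_duration=60):
--     start_time = timestamps[0]
--     segments = []
--     segment = []
--     for i, time in enumerate(timestamps):
--         if time - start_time < segment_duration:
--             segment.append(data[i])
--         else:
--             segments.append(segment)
--             segment = [data[i]]
--             start_time = time
--     if segment:  # appending any remaining data
--         segments.append(segment)
--     return segments
-- ===== SOURCE B (Python) =====
-- def segment_data_by_time(timestamps, data, segment_duration=60):
--     # First pass: compute segment boundary indices; second pass: slice data.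
--     start_time = timestamps[0]
--     boundaries = [0]
--     for i, time in enumerate(timestamps):
--         if time - start_time >= segment_duration:
--             boundaries.append(i)
--             start_time = time
--     boundaries.append(len(timestamps))
--     return [list(data[a:b]) for a, b in zip(boundaries, boundaries[1:])]
-- ===== Notes on version B (the rewrite author's own statement) =====
-- stated objective: alternative
-- what changed: A builds each segment element by element with running append/reset inside one loop; B first computes only the boundary indices where a new segment starts, then produces the segments in a second pass by slicing the data between consecutive boundaries.
import Mathlib
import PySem

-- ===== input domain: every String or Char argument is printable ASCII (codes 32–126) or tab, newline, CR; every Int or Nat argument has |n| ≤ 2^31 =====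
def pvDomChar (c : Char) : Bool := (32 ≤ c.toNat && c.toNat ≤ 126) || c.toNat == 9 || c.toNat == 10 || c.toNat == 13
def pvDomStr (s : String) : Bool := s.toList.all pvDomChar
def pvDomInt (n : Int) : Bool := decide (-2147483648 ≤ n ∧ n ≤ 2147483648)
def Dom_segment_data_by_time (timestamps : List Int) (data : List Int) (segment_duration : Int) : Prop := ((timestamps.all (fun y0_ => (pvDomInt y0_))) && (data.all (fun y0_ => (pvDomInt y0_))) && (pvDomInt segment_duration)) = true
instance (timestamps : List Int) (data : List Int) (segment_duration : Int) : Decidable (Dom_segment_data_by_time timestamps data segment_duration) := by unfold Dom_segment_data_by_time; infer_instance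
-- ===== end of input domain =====

-- B replaces A's element-by-element segment building with a two-pass scheme
-- (compute boundary indices, then slice the data); same return value on Pre_.

-- ===== PORT A =====
-- the for-loop of A: state (start_time, segments, segment), i the running index
def segLoopA (data : List Int) (dur : Int) :
    List Int → Nat → Int → List (List Int) → List Int → (List (List Int)) × List Int
  | [], _, _, segs, cur => (segs, cur)
  | t :: ts, i, start, segs, cur =>
    let d := (PySem.List.pyGet? data (i : Int)).getD 0   -- data[i]; in range under Pre_
    if t - start < dur then
      segLoopA data dur ts (i + 1) start segs (cur ++ [d])
    else
      segLoopA data dur ts (i + 1) t (segs ++ [cur]) [d]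

def segment_data_by_time (timestamps : List Int) (data : List Int) (segment_duration : Int) : List (List Int) :=
  match timestamps with
  | [] => []          -- Python raises IndexError on timestamps[0]; excluded by Pre_
  | t0 :: _ =>
    let p := segLoopA data segment_duration timestamps 0 t0 [] []
    if p.2 = [] then p.1 else p.1 ++ [p.2]

-- ===== PORT B =====
-- first pass of B: collect boundary indices
def segLoopB (dur : Int) : List Int → Nat → Int → List Int → List Int
  | [], _, _, bs => bs
  | t :: ts, i, start, bs =>
    if t - start ≥ dur then segLoopB dur ts (i + 1) t (bs ++ [(i : Int)])
    else segLoopB dur ts (i + 1) start bs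

-- second pass of B: [list(data[a:b]) for a, b in zip(boundaries, boundaries[1:])]
def pySlicesOf (data bs : List Int) : List (List Int) :=
  (bs.zip (PySem.List.slice bs (some 1) none)).map
    (fun p => PySem.List.slice data (some p.1) (some p.2))

def segment_data_by_time_alt (timestamps : List Int) (data : List Int) (segment_duration : Int) : List (List Int) :=
  match timestamps with
  | [] => []          -- timestamps[0] raises here too; excluded by Pre_
  | t0 :: _ =>
    pySlicesOf data
      (segLoopB segment_duration timestamps 0 t0 [0] ++ [(timestamps.length : Int)])

-- ===== PRECONDITION & SPEC =====
-- Pre_ excludes exactly the inputs where A raises IndexError: empty timestamps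
-- (timestamps[0]) or data shorter than timestamps (data[i]).
def Pre_segment_data_by_time (timestamps : List Int) (data : List Int) (segment_duration : Int) : Prop :=
  timestamps ≠ [] ∧ timestamps.length ≤ data.length

instance (timestamps : List Int) (data : List Int) (segment_duration : Int) : Decidable (Pre_segment_data_by_time timestamps data segment_duration) := by unfold Pre_segment_data_by_time; infer_instance

def pvWitness_segment_data_by_time : List Int × List Int × Int := ([0, 30, 100], [1, 2, 3], 60)

def Spec_segment_data_by_time (timestamps : List Int) (data : List Int) (segment_duration : Int) (out : List (List Int)) : Prop := out = segment_data_by_time_alt timestamps data segment_duration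
instance (timestamps : List Int) (data : List Int) (segment_duration : Int) (out : List (List Int)) : Decidable (Spec_segment_data_by_time timestamps data segment_duration out) := by unfold Spec_segment_data_by_time; infer_instance

-- ===== CLAIM (what is proved, stated in full; the proofs are below) =====
def Claim_equal_segment_data_by_time : Prop := ∀ (timestamps : List Int) (data : List Int) (segment_duration : Int), Dom_segment_data_by_time timestamps data segment_duration → Pre_segment_data_by_time timestamps data segment_duration → Spec_segment_data_by_time timestamps data segment_duration (segment_data_by_time timestamps data segment_duration)

-- ===== LEMMAS AND PROOFS =====

-- unfolding pySlicesOf on a two-or-more list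
lemma pySlicesOf_cons_cons (data : List Int) (x y : Int) (rest : List Int) :
    pySlicesOf data (x :: y :: rest)
      = PySem.List.slice data (some x) (some y) :: pySlicesOf data (y :: rest) := by
  simp [pySlicesOf, PySem.List.slice_from_one]

-- appending one more boundary appends one more slice
lemma pySlicesOf_snoc (data : List Int) :
    ∀ (p : List Int) (x y : Int),
      pySlicesOf data (p ++ [x, y])
        = pySlicesOf data (p ++ [x]) ++ [PySem.List.slice data (some x) (some y)] := by
  intro p
  induction p with
  | nil =>
      intro x y
      simp [pySlicesOf, PySem.List.slice_from_one]
  | cons a p' ih =>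
      intro x y
      cases p' with
      | nil =>
          simp [pySlicesOf, PySem.List.slice_from_one]
      | cons c p'' =>
          have h1 := pySlicesOf_cons_cons data a c (p'' ++ [x, y])
          have h2 := pySlicesOf_cons_cons data a c (p'' ++ [x])
          simp only [List.cons_append] at *
          rw [h1, h2, ih x y]; simp

-- extending a prefix slice by its next element
lemma take_succ_slice (data : List Int) (b i : Nat) (hbi : b ≤ i) (hi : i < data.length) :
    (data.drop b).take (i + 1 - b)
      = (data.drop b).take (i - b) ++ [(PySem.List.pyGet? data (i : Int)).getD 0] := by
  have hget : PySem.List.pyGet? data (i : Int) = data[i]? := by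
    simp [pysem]
  have : i + 1 - b = (i - b) + 1 := by omega
  rw [this, List.take_add_one]
  rw [List.getElem?_drop]
  have : b + (i - b) = i := by omega
  rw [this, hget, List.getElem?_eq_getElem hi]
  simp

-- a one-element slice
lemma slice_one (data : List Int) (i : Nat) (hi : i < data.length) :
    (data.drop i).take 1 = [(PySem.List.pyGet? data (i : Int)).getD 0] := by
  have h := take_succ_slice data i i (le_refl i) hi
  simpa using h

-- the main loop correspondence: slicing at B's boundaries rebuilds A's segments
lemma main_loop (data : List Int) (dur : Int) :
    ∀ (ts : List Int) (i b : Nat) (start : Int) (segs : List (List Int))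
      (bs0 : List Int) (cur : List Int),
      i + ts.length ≤ data.length →
      b ≤ i →
      cur = (data.drop b).take (i - b) →
      pySlicesOf data (bs0 ++ [(b : Int)]) = segs →
      pySlicesOf data
          (segLoopB dur ts i start (bs0 ++ [(b : Int)]) ++ [((i + ts.length : Nat) : Int)])
        = (segLoopA data dur ts i start segs cur).1
            ++ [(segLoopA data dur ts i start segs cur).2] := by
  intro ts
  induction ts with
  | nil =>
      intro i b start segs bs0 cur hlen hbi hcur hsegs
      simp only [segLoopA, segLoopB, List.length_nil, Nat.add_zero]
      have : bs0 ++ [(b : Int)] ++ [(i : Int)] = bs0 ++ [(b : Int), (i : Int)] := by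
        simp
      rw [this, pySlicesOf_snoc data bs0 (b : Int) (i : Int), hsegs,
          PySem.List.slice_natCast, ← hcur]
  | cons t ts' ih =>
      intro i b start segs bs0 cur hlen hbi hcur hsegs
      have hi : i < data.length := by
        simp only [List.length_cons] at hlen; omega
      by_cases h : t - start < dur
      · have hnot : ¬ (t - start ≥ dur) := by omega
        simp only [segLoopA, segLoopB, if_pos h, if_neg hnot]
        have hlen' : (i + 1) + ts'.length ≤ data.length := by
          simp only [List.length_cons] at hlen; omega
        have hcur' : cur ++ [(PySem.List.pyGet? data (i : Int)).getD 0]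
            = (data.drop b).take ((i + 1) - b) := by
          rw [take_succ_slice data b i hbi hi, ← hcur]
        have := ih (i + 1) b start segs bs0
          (cur ++ [(PySem.List.pyGet? data (i : Int)).getD 0]) hlen' (by omega)
          hcur' hsegs
        simpa [Nat.add_comm, Nat.add_assoc, Nat.add_left_comm] using this
      · have hge : t - start ≥ dur := by omega
        simp only [segLoopA, segLoopB, if_pos hge, if_neg h]
        have hlen' : (i + 1) + ts'.length ≤ data.length := by
          simp only [List.length_cons] at hlen; omega
        have hcur' : [(PySem.List.pyGet? data (i : Int)).getD 0]
            = (data.drop i).take ((i + 1) - i) := by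
          have : (i + 1) - i = 1 := by omega
          rw [this, slice_one data i hi]
        have hsegs' : pySlicesOf data ((bs0 ++ [(b : Int)]) ++ [(i : Int)])
            = segs ++ [cur] := by
          have : bs0 ++ [(b : Int)] ++ [(i : Int)] = bs0 ++ [(b : Int), (i : Int)] := by
            simp
          rw [this, pySlicesOf_snoc data bs0 (b : Int) (i : Int), hsegs,
              PySem.List.slice_natCast, ← hcur]
        have := ih (i + 1) i t (segs ++ [cur]) (bs0 ++ [(b : Int)])
          [(PySem.List.pyGet? data (i : Int)).getD 0] hlen' (by omega)
          hcur' hsegs'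
        simpa [Nat.add_comm, Nat.add_assoc, Nat.add_left_comm] using this

-- A's trailing segment is nonempty whenever it has processed at least one element
lemma segLoopA_snd_ne_nil (data : List Int) (dur : Int) :
    ∀ (ts : List Int) (i : Nat) (start : Int) (segs : List (List Int)) (cur : List Int),
      (ts = [] → cur ≠ []) →
      (segLoopA data dur ts i start segs cur).2 ≠ [] := by
  intro ts
  induction ts with
  | nil =>
      intro i start segs cur h
      simpa [segLoopA] using h rfl
  | cons t ts' ih =>
      intro i start segs cur h
      simp only [segLoopA]
      by_cases hc : t - start < dur
      · rw [if_pos hc]; exact ih _ _ _ _ (fun _ => by simp)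
      · rw [if_neg hc]; exact ih _ _ _ _ (fun _ => by simp)

-- ===== VERDICT (by name: the statement is the Claim_ definition above) =====
theorem segment_data_by_time_spec : Claim_equal_segment_data_by_time := by
  intro timestamps data segment_duration _hdom hpre
  unfold Spec_segment_data_by_time
  obtain ⟨hne, hlen⟩ := hpre
  cases timestamps with
  | nil => exact absurd rfl hne
  | cons t0 rest =>
      simp only [segment_data_by_time, segment_data_by_time_alt]
      have hinit : pySlicesOf data ([] ++ [((0 : Nat) : Int)]) = ([] : List (List Int)) := by
        simp [pySlicesOf, PySem.List.slice_from_one]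
      have hmain := main_loop data segment_duration (t0 :: rest) 0 0 t0 [] [] []
        (by simpa using hlen) (le_refl 0) (by simp) hinit
      have hcur := segLoopA_snd_ne_nil data segment_duration (t0 :: rest) 0 t0 [] []
        (by intro hc; exact absurd hc (by simp))
      rw [if_neg hcur]
      simp only [Nat.zero_add, List.nil_append, Nat.cast_zero] at hmain
      rw [← hmain]
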